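-- pv_equiv track=rewrite | github.com/rgouveiamendes/missal | _data_processing/_web_scraping/lent/extract_propers.py | get_mass_by_sections
-- ===== SOURCE A (Python) =====
-- def get_mass_by_sections(mass_raw_text, sections):
--   mass_by_section = {}
--   current_section = ''
--   for text in mass_raw_text:
--     text = text.replace('\n', ' ')
--     is_section_title = False
--     for section in sections:
--       if section in text:
--         is_section_title = True
--         current_section = text
--         mass_by_section[current_section] = []
--     if not is_section_title and current_section != '':
--       mass_by_section[current_section].append(text)
--
--   return mass_by_section
-- ===== SOURCE B (Python) =====
-- def get_mass_by_sections(mass_raw_text, sections):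
--     def is_header(t):
--         return any(s in t for s in sections)
--
--     def split_run(lines):
--         # longest prefix of non-header lines, and the remainder
--         for k, t in enumerate(lines):
--             if is_header(t):
--                 return lines[:k], lines[k:]
--         return lines, []
--
--     lines = [t.replace('\n', ' ') for t in mass_raw_text]
--     segs = []
--     rest = split_run(lines)[1]  # drop lines before the first header
--     while rest:
--         head = rest[0]
--         body, rest = split_run(rest[1:])
--         segs.append((head, body))
--     result = {}
--     for header, body in segs:
--         result[header] = body  # a repeated header text overwrites (keeps position)
--     return result
-- ===== Notes on version B (the rewrite author's own statement) =====
-- stated objective: faster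
-- what changed: A builds the dict in a single pass with a current-section accumulator, scanning every section per line and appending content line by line; B first splits the cleaned lines into (header, body-slice) segments (header test via short-circuiting any(), bodies taken as slices) and then builds the dict from the segments in one final insertion loop.
import Mathlib
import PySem

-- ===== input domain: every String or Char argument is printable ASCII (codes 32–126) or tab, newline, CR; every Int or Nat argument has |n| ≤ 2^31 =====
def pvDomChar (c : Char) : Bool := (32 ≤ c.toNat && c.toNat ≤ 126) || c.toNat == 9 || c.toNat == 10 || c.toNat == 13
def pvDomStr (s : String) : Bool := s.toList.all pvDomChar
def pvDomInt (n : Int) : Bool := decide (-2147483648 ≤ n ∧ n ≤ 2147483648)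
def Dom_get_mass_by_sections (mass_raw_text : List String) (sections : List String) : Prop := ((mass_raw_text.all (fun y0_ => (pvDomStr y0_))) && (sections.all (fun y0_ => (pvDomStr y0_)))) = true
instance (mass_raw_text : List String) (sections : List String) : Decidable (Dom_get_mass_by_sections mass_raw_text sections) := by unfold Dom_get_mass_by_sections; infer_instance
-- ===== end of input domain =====

-- B replaces A's single-pass dict/current-section accumulator by a two-phase segmentation
-- (split the cleaned lines into header-led segments, then build the dict from the segments);
-- objective: a different decomposition; a timing run measured B faster (constant factor: the per-line section scan short-circuits and bodies are bulk slices).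


-- ===== PORT A =====
-- inner 'for section in sections' loop of A, over the state (is_section_title, current_section, mass_by_section)
def pvInnerStep (text : String) (acc : Bool × String × PySem.Dict String (List String)) (sec : String) :
    Bool × String × PySem.Dict String (List String) :=
  if PySem.Str.isIn sec text then (true, text, acc.2.2.insert text []) else acc

-- body of A's 'for text in mass_raw_text' loop, state = (mass_by_section, current_section);
-- mass_by_section[current_section].append(text) is ported as insert of getD ++ [text] (current_section,
-- when nonempty, is always a present key, so the getD default is never consulted)
def pvOuterStep (sections : List String) (st : PySem.Dict String (List String) × String) (text0 : String) :
    PySem.Dict String (List String) × String :=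
  let text := PySem.Str.replace text0 "\n" " "
  let inner := sections.foldl (pvInnerStep text) (false, st.2, st.1)
  if inner.1 = false ∧ inner.2.1 ≠ "" then
    (inner.2.2.insert inner.2.1 (inner.2.2.getD inner.2.1 [] ++ [text]), inner.2.1)
  else
    (inner.2.2, inner.2.1)

def get_mass_by_sections (mass_raw_text : List String) (sections : List String) : List (String × List String) :=
  ((mass_raw_text.foldl (pvOuterStep sections) (PySem.Dict.empty, "")).1).items

-- ===== PORT B =====
def pvIsHeader (sections : List String) (t : String) : Bool :=
  sections.any (fun s => PySem.Str.isIn s t)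

-- Source B's split_run: longest prefix of non-header lines, and the remainder
def pvSplitRun (sections : List String) : List String → List String × List String
  | [] => ([], [])
  | t :: ts =>
    if pvIsHeader sections t then ([], t :: ts)
    else
      let r := pvSplitRun sections ts
      (t :: r.1, r.2)

theorem pvSplitRun_snd_length_le (sections : List String) (l : List String) :
    (pvSplitRun sections l).2.length ≤ l.length := by
  induction l with
  | nil => simp [pvSplitRun]
  | cons t ts ih =>
    simp only [pvSplitRun]
    split
    · simp
    · simpa using Nat.le_succ_of_le ih

-- Source B's 'while rest:' loop collecting (header, body) segments
def pvSegs (sections : List String) : List String → List (String × List String)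
  | [] => []
  | head :: rest1 =>
    let br := pvSplitRun sections rest1
    (head, br.1) :: pvSegs sections br.2
termination_by l => l.length
decreasing_by
  simpa using Nat.lt_succ_of_le (pvSplitRun_snd_length_le sections rest1)

def get_mass_by_sections_alt (mass_raw_text : List String) (sections : List String) : List (String × List String) :=
  let lines := mass_raw_text.map (fun t => PySem.Str.replace t "\n" " ")
  let segs := pvSegs sections (pvSplitRun sections lines).2
  (segs.foldl (fun (d : PySem.Dict String (List String)) p => d.insert p.1 p.2) PySem.Dict.empty).items

-- ===== PRECONDITION & SPEC =====
def Spec_get_mass_by_sections (mass_raw_text : List String) (sections : List String) (out : List (String × List String)) : Prop := out = get_mass_by_sections_alt mass_raw_text sections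
instance (mass_raw_text : List String) (sections : List String) (out : List (String × List String)) : Decidable (Spec_get_mass_by_sections mass_raw_text sections out) := by unfold Spec_get_mass_by_sections; infer_instance

-- ===== CLAIM (what is proved, stated in full; the proofs are below) =====
def Claim_equal_get_mass_by_sections : Prop := ∀ (mass_raw_text : List String) (sections : List String), Dom_get_mass_by_sections mass_raw_text sections → Spec_get_mass_by_sections mass_raw_text sections (get_mass_by_sections mass_raw_text sections)

-- ===== LEMMAS AND PROOFS =====

-- A's loop body with the '\n' -> ' ' cleaning factored out (proof-only restatement of pvOuterStep)
def pvStep (sections : List String) (st : PySem.Dict String (List String) × String) (text : String) :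
    PySem.Dict String (List String) × String :=
  let inner := sections.foldl (pvInnerStep text) (false, st.2, st.1)
  if inner.1 = false ∧ inner.2.1 ≠ "" then
    (inner.2.2.insert inner.2.1 (inner.2.2.getD inner.2.1 [] ++ [text]), inner.2.1)
  else
    (inner.2.2, inner.2.1)

-- if the empty string is a header then every string is a header ('' is a substring of everything)
theorem pvIsHeader_empty_all (sections : List String)
    (h : pvIsHeader sections "" = true) (u : String) : pvIsHeader sections u = true := by
  simp only [pvIsHeader, List.any_eq_true] at h ⊢
  obtain ⟨s, hs, hin⟩ := h
  refine ⟨s, hs, ?_⟩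
  rw [PySem.Str.isIn_iff_infix] at hin ⊢
  have : s.toList = [] := List.eq_nil_of_infix_nil (by simpa using hin)
  simp [this]

theorem pvSplitRun_eq (sections : List String) (l : List String) :
    pvSplitRun sections l
      = (l.takeWhile (fun t => !pvIsHeader sections t), l.dropWhile (fun t => !pvIsHeader sections t)) := by
  induction l with
  | nil => simp [pvSplitRun]
  | cons t ts ih =>
    by_cases h : pvIsHeader sections t = true
    · simp [pvSplitRun, h]
    · simp only [Bool.not_eq_true] at h
      simp [pvSplitRun, h, ih]

-- the inner 'for section in sections' loop: either some section matches and the state becomes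
-- (True, text, d with d[text] = []), or the state is unchanged
theorem pvInner_eq (text : String) (secs : List String) :
    ∀ (b : Bool) (c : String) (d : PySem.Dict String (List String)),
    secs.foldl (pvInnerStep text) (b, c, d)
      = if secs.any (fun s => PySem.Str.isIn s text) then (true, text, d.insert text []) else (b, c, d) := by
  induction secs with
  | nil => intro b c d; simp
  | cons s ss ih =>
    intro b c d
    rw [List.foldl_cons]
    have hstep : pvInnerStep text (b, c, d) s
        = if PySem.Str.isIn s text then (true, text, d.insert text []) else (b, c, d) := rfl
    by_cases h : PySem.Str.isIn s text = true
    · rw [hstep, if_pos h, ih true text (d.insert text [])]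
      simp only [PySem.Dict.insert_insert_self, ite_self, List.any_cons, h, Bool.true_or, if_true]
    · have h' : PySem.Str.isIn s text = false := by simpa using h
      rw [hstep, if_neg h, ih b c d]
      simp only [List.any_cons, h', Bool.false_or]

-- how A's (cleaned) loop body acts on a state, by the shape of the line
theorem pvStep_header (sections : List String) (D : PySem.Dict String (List String)) (cur t : String)
    (h : pvIsHeader sections t = true) : pvStep sections (D, cur) t = (D.insert t [], t) := by
  unfold pvStep
  rw [pvInner_eq, show (sections.any fun s => PySem.Str.isIn s t) = true from h]
  simp

theorem pvStep_body (sections : List String) (D : PySem.Dict String (List String)) (cur t : String)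
    (h : pvIsHeader sections t = false) (hcur : cur ≠ "") :
    pvStep sections (D, cur) t = (D.insert cur (D.getD cur [] ++ [t]), cur) := by
  unfold pvStep
  rw [pvInner_eq, show (sections.any fun s => PySem.Str.isIn s t) = false from h]
  simp [hcur]

theorem pvStep_drop (sections : List String) (D : PySem.Dict String (List String)) (t : String)
    (h : pvIsHeader sections t = false) : pvStep sections (D, "") t = (D, "") := by
  unfold pvStep
  rw [pvInner_eq, show (sections.any fun s => PySem.Str.isIn s t) = false from h]
  simp

-- the main invariant: from a state (d with d[cur] = v, cur), A's remaining loop produces the same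
-- dict as inserting cur -> v ++ (run of non-header lines) and then folding B's later segments in
theorem pvL2 (sections : List String) :
    ∀ (lines : List String) (d : PySem.Dict String (List String)) (cur : String) (v : List String),
    (cur = "" → ∀ u, pvIsHeader sections u = true) →
    (lines.foldl (pvStep sections) (d.insert cur v, cur)).1
      = (pvSegs sections (lines.dropWhile (fun t => !pvIsHeader sections t))).foldl
          (fun (d : PySem.Dict String (List String)) p => d.insert p.1 p.2)
          (d.insert cur (v ++ lines.takeWhile (fun t => !pvIsHeader sections t))) := by
  intro lines
  induction lines with
  | nil => intro d cur v _; simp [pvSegs]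
  | cons t ts ih =>
    intro d cur v hcur
    by_cases h : pvIsHeader sections t = true
    · have ht : t = "" → ∀ u, pvIsHeader sections u = true := by
        intro he; exact pvIsHeader_empty_all sections (he ▸ h)
      rw [List.foldl_cons, pvStep_header sections _ cur t h, ih (d.insert cur v) t [] ht]
      simp only [List.dropWhile_cons, List.takeWhile_cons, h, Bool.not_true]
      simp [pvSegs, pvSplitRun_eq]
    · simp only [Bool.not_eq_true] at h
      have hcur' : cur ≠ "" := by
        intro he; exact absurd (hcur he t) (by simp [h])
      rw [List.foldl_cons, pvStep_body sections _ cur t h hcur',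
        PySem.Dict.getD_insert_self, PySem.Dict.insert_insert_self,
        ih d cur (v ++ [t]) (fun he => absurd he hcur')]
      simp [h, List.append_assoc]

-- before the first header: non-header lines are dropped by both programs
theorem pvL1 (sections : List String) :
    ∀ (lines : List String) (d : PySem.Dict String (List String)),
    (lines.foldl (pvStep sections) (d, "")).1
      = (pvSegs sections (lines.dropWhile (fun t => !pvIsHeader sections t))).foldl
          (fun (d : PySem.Dict String (List String)) p => d.insert p.1 p.2) d := by
  intro lines
  induction lines with
  | nil => intro d; simp [pvSegs]
  | cons t ts ih =>
    intro d
    by_cases h : pvIsHeader sections t = true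
    · have ht : t = "" → ∀ u, pvIsHeader sections u = true := by
        intro he; exact pvIsHeader_empty_all sections (he ▸ h)
      have hstep : pvStep sections (d, "") t = (d.insert t [], t) := pvStep_header sections d "" t h
      rw [List.foldl_cons, hstep, pvL2 sections ts d t [] ht]
      simp only [List.dropWhile_cons, h, Bool.not_true]
      simp [pvSegs, pvSplitRun_eq]
    · simp only [Bool.not_eq_true] at h
      rw [List.foldl_cons, pvStep_drop sections d t h, ih d]
      simp [h]

-- ===== VERDICT (by name: the statement is the Claim_ definition above) =====
theorem get_mass_by_sections_spec : Claim_equal_get_mass_by_sections := by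
  intro mass_raw_text sections _
  unfold Spec_get_mass_by_sections
  have hfun : pvOuterStep sections
      = fun st t0 => pvStep sections st (PySem.Str.replace t0 "\n" " ") := by
    funext st t0; rfl
  show ((mass_raw_text.foldl (pvOuterStep sections) (PySem.Dict.empty, "")).1).items
      = ((pvSegs sections
            (pvSplitRun sections (mass_raw_text.map (fun t => PySem.Str.replace t "\n" " "))).2).foldl
          (fun (d : PySem.Dict String (List String)) p => d.insert p.1 p.2) PySem.Dict.empty).items
  rw [pvSplitRun_eq, hfun, ← List.foldl_map, pvL1]
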